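-- pv_equiv track=rewrite | github.com/Bcapard/snake_lineup_v2 | snake_rules.py | _build_slot_patterns
-- ===== SOURCE A (Python) =====
-- from typing import Dict, List, Iterable, Optional
--
-- NUM_PERIODS = 8
--
-- def _build_slot_patterns(slot_to_periods: Dict[int, List[int]]) -> Dict[int, List[int]]:
--     patterns: Dict[int, List[int]] = {}
--     for slot, periods in slot_to_periods.items():
--         patterns[slot] = [
--             1 if period in periods else 0
--             for period in range(1, NUM_PERIODS + 1)
--         ]
--     return patterns
-- ===== SOURCE B (Python) =====
-- NUM_PERIODS = 8
--
-- def _build_slot_patterns(slot_to_periods):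
--     # scatter: one pass over each slot's periods instead of 8 membership scans
--     patterns = {}
--     for slot, periods in slot_to_periods.items():
--         row = [0] * NUM_PERIODS
--         for p in periods:
--             if 1 <= p <= NUM_PERIODS:
--                 row[p - 1] = 1
--         patterns[slot] = row
--     return patterns
-- ===== Notes on version B (the rewrite author's own statement) =====
-- stated objective: faster
-- what changed: Replaces the gather (for each of the 8 fixed positions, test membership in the periods list) by a scatter (zero row, then one pass over the periods setting row[p-1]=1 for in-range p).
import Mathlib
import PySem

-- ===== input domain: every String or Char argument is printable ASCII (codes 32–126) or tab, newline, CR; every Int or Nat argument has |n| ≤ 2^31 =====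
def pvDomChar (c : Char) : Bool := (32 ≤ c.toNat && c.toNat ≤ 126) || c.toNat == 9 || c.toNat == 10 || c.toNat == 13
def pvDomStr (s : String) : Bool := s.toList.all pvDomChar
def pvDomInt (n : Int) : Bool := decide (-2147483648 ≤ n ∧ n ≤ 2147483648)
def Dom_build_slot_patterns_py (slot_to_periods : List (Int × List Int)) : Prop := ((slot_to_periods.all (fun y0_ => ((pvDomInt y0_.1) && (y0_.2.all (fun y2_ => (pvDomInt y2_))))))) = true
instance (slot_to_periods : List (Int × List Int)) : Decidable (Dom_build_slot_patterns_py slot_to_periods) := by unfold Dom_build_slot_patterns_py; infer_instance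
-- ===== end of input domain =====

-- ===== PORT A =====
-- A: for each slot, gather — test 'period in periods' for each of the 8 fixed positions
def build_slot_patterns_py (slot_to_periods : List (Int × List Int)) : List (Int × List Int) :=
  (slot_to_periods.foldl
    (fun (patterns : PySem.Dict Int (List Int)) sp =>
      patterns.insert sp.1
        ((PySem.List.pyRange 1 (8 + 1) 1).map (fun period => if period ∈ sp.2 then 1 else 0)))
    PySem.Dict.empty).items

-- ===== PORT B =====
-- B: scatter — start from a zero row, one pass over periods setting row[p-1] = 1 for in-range p
def pvScatterRow (periods : List Int) : List Int :=
  periods.foldl (fun row p => if 1 ≤ p ∧ p ≤ 8 then row.set (p - 1).toNat 1 else row)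
    (List.replicate 8 0)

def build_slot_patterns_py_alt (slot_to_periods : List (Int × List Int)) : List (Int × List Int) :=
  (slot_to_periods.foldl
    (fun (patterns : PySem.Dict Int (List Int)) sp => patterns.insert sp.1 (pvScatterRow sp.2))
    PySem.Dict.empty).items

-- ===== PRECONDITION & SPEC =====
def Spec_build_slot_patterns_py (slot_to_periods : List (Int × List Int)) (out : List (Int × List Int)) : Prop := out = build_slot_patterns_py_alt slot_to_periods
instance (slot_to_periods : List (Int × List Int)) (out : List (Int × List Int)) : Decidable (Spec_build_slot_patterns_py slot_to_periods out) := by unfold Spec_build_slot_patterns_py; infer_instance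

-- ===== CLAIM (what is proved, stated in full; the proofs are below) =====
def Claim_equal_build_slot_patterns_py : Prop := ∀ (slot_to_periods : List (Int × List Int)), Dom_build_slot_patterns_py slot_to_periods → Spec_build_slot_patterns_py slot_to_periods (build_slot_patterns_py slot_to_periods)

-- ===== LEMMAS AND PROOFS =====

lemma pvLoop_len (periods : List Int) (row : List Int) :
    (periods.foldl (fun row p => if 1 ≤ p ∧ p ≤ 8 then row.set (p - 1).toNat 1 else row) row).length
      = row.length := by
  induction periods generalizing row with
  | nil => rfl
  | cons p ps ih =>
    simp only [List.foldl_cons]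
    rw [ih]
    split_ifs <;> simp

lemma pvLoop_get (periods : List Int) (row : List Int) (h : row.length = 8)
    (i : Nat) (hi : i < 8) :
    (periods.foldl (fun row p => if 1 ≤ p ∧ p ≤ 8 then row.set (p - 1).toNat 1 else row) row)[i]'(by
        rw [pvLoop_len, h]; exact hi)
      = if ((i : Int) + 1) ∈ periods then 1 else row[i]'(by rw [h]; exact hi) := by
  induction periods generalizing row with
  | nil => simp
  | cons p ps ih =>
    simp only [List.foldl_cons, List.mem_cons]
    by_cases hp : 1 ≤ p ∧ p ≤ 8
    · rw [ih _ (by rw [if_pos hp]; simp [h])]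
      by_cases hmem : ((i : Int) + 1) ∈ ps
      · simp [hmem]
      · by_cases heq : ((i : Int) + 1) = p
        · have : (p - 1).toNat = i := by omega
          simp [heq, if_pos hp, this, List.getElem_set_self]
        · have hne : p.toNat - 1 ≠ i := by omega
          simp [heq, if_pos hp, List.getElem_set_ne, hne]
    · rw [ih _ (by rw [if_neg hp]; exact h)]
      have heq : ((i : Int) + 1) ≠ p := by omega
      simp [heq, if_neg hp]

lemma pvRow_eq (periods : List Int) :
    pvScatterRow periods
      = (PySem.List.pyRange 1 (8 + 1) 1).map (fun period => if period ∈ periods then 1 else 0) := by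
  have hr : PySem.List.pyRange 1 (8 + 1) 1 = [1, 2, 3, 4, 5, 6, 7, 8] := by decide
  rw [hr]
  unfold pvScatterRow
  apply List.ext_getElem
  · rw [pvLoop_len]; rfl
  · intro i h1 h2
    have hi : i < 8 := by rw [pvLoop_len] at h1; simpa using h1
    rw [pvLoop_get periods _ (by simp) i hi]
    interval_cases i <;> norm_num

-- ===== VERDICT (by name: the statement is the Claim_ definition above) =====
theorem build_slot_patterns_py_spec : Claim_equal_build_slot_patterns_py := by
  intro l _
  unfold Spec_build_slot_patterns_py build_slot_patterns_py build_slot_patterns_py_alt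
  simp only [pvRow_eq]
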